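-- pv_equiv track=rewrite | github.com/GeorgiMateev/fuzzy-search | src/unifier.py | try_merge_variables
-- ===== SOURCE A (Python) =====
-- from typing import List, Dict
--
-- def try_merge_variables(all_variables: Dict, variables_to_add: Dict) -> (bool, Dict):
--     """
--     Merges the two dictionaries with variables.
--     If there are same keys but with different values returns false.
--     :param all_variables: First dict with variables.
--     :param variables_to_add: Another dict to merge
--     :return: True if the are no variable value conflicts, false otherwise.
--     """
--     new_vars = dict(all_variables)
--
--     for variable, value in variables_to_add.items():
--         if variable in new_vars and new_vars[variable] != value:
--             return False, {}
--         else: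
--             new_vars[variable] = value
--
--     return True, new_vars
-- ===== SOURCE B (Python) =====
-- def try_merge_variables(all_variables, variables_to_add):
--     """
--     Merges the two dictionaries with variables.
--     If there are same keys but with different values returns false.
--     """
--     merged = {**all_variables, **variables_to_add}
--     if merged == {**variables_to_add, **all_variables}:
--         return True, merged
--     return False, {}
-- ===== Notes on version B (the rewrite author's own statement) =====
-- stated objective: alternative
-- what changed: B never scans for conflicting keys at all: it merges the two dicts in both orders ({**a,**b} and {**b,**a}) and detects a conflict by the fact that the two merges are unequal as dicts, whereas A runs a fused copy-then-check-and-accumulate loop with an early return.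
import Mathlib
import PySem

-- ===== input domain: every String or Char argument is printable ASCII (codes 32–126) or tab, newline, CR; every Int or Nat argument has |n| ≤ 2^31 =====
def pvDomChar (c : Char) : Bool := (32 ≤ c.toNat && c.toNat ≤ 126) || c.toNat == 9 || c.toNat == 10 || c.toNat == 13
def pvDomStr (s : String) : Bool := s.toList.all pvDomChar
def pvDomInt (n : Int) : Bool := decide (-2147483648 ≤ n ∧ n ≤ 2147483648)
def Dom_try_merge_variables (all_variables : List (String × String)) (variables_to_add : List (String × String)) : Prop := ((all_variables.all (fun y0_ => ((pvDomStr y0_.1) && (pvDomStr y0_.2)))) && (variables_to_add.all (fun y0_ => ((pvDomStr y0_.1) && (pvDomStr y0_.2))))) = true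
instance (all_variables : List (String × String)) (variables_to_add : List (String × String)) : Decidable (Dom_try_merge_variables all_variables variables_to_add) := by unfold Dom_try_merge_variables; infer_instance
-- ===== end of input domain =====

-- B never scans for conflicting keys: it merges in both orders and detects a conflict
-- by the two merged dicts comparing unequal under Python's order-insensitive dict ==.


-- ===== PORT A =====
-- the `for variable, value in variables_to_add.items():` loop with its early `return False, {}`
def tmvLoopA (nv : PySem.Dict String String) : List (String × String) → Bool × (List (String × String))
  | [] => (true, nv.items)
  | (variable_, value) :: rest =>
    if nv.contains variable_ && (nv.get? variable_ != some value) then (false, [])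
    else tmvLoopA (nv.insert variable_ value) rest

def try_merge_variables (all_variables : List (String × String)) (variables_to_add : List (String × String)) : Bool × (List (String × String)) :=
  tmvLoopA (PySem.Dict.ofList all_variables) variables_to_add

-- ===== PORT B =====
-- Python's `==` on dicts, ported by hand (CPython: equal lengths, then every item of the
-- first looked up in the second); it ignores insertion order, unlike `=` on PySem.Dict.
def pyDictEq (d1 d2 : PySem.Dict String String) : Bool :=
  d1.size == d2.size && d1.items.all (fun p => d2.get? p.1 == some p.2)

def try_merge_variables_alt (all_variables : List (String × String)) (variables_to_add : List (String × String)) : Bool × (List (String × String)) :=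
  -- merged = {**all_variables, **variables_to_add}
  let merged := (PySem.Dict.ofList all_variables).update variables_to_add
  -- if merged == {**variables_to_add, **all_variables}: return True, merged
  if pyDictEq merged ((PySem.Dict.ofList variables_to_add).update all_variables) then
    (true, merged.items)
  else (false, [])

-- ===== PRECONDITION & SPEC =====
-- Pre_ requires each association list to have distinct keys: a Python dict cannot hold
-- duplicate keys, so a duplicate-key list does not encode any input A can receive.
def Pre_try_merge_variables (all_variables : List (String × String)) (variables_to_add : List (String × String)) : Prop :=
  (all_variables.map Prod.fst).Nodup ∧ (variables_to_add.map Prod.fst).Nodup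
instance (all_variables : List (String × String)) (variables_to_add : List (String × String)) : Decidable (Pre_try_merge_variables all_variables variables_to_add) := by unfold Pre_try_merge_variables; infer_instance

def pvWitness_try_merge_variables : (List (String × String)) × (List (String × String)) :=
  ([("a", "1"), ("b", "2")], [("a", "1"), ("c", "3")])

def Spec_try_merge_variables (all_variables : List (String × String)) (variables_to_add : List (String × String)) (out : Bool × (List (String × String))) : Prop := out = try_merge_variables_alt all_variables variables_to_add
instance (all_variables : List (String × String)) (variables_to_add : List (String × String)) (out : Bool × (List (String × String))) : Decidable (Spec_try_merge_variables all_variables variables_to_add out) := by unfold Spec_try_merge_variables; infer_instance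

-- ===== CLAIM (what is proved, stated in full; the proofs are below) =====
def Claim_equal_try_merge_variables : Prop := ∀ (all_variables : List (String × String)) (variables_to_add : List (String × String)), Dom_try_merge_variables all_variables variables_to_add → Pre_try_merge_variables all_variables variables_to_add → Spec_try_merge_variables all_variables variables_to_add (try_merge_variables all_variables variables_to_add)

-- ===== LEMMAS AND PROOFS =====

-- with keys distinct, building the dict keeps the list unchanged
lemma items_ofList_nodup (b : List (String × String)) (h : (b.map Prod.fst).Nodup) :
    (PySem.Dict.ofList b).items = b := by
  have := PySem.Dict.items_foldl_insert_fresh b Prod.fst Prod.snd (PySem.Dict.empty)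
    (by intro a _; rfl) h
  simpa [PySem.Dict.ofList, PySem.Dict.update, PySem.Dict.empty] using this

lemma keys_ofList_nodup (b : List (String × String)) (h : (b.map Prod.fst).Nodup) :
    (PySem.Dict.ofList b).keys = b.map Prod.fst := by
  show (PySem.Dict.ofList b).items.map Prod.fst = b.map Prod.fst
  rw [items_ofList_nodup b h]

-- lookup in the merge loop: the added dict wins, else fall back to the base dict
lemma get?_update_nodup (l : List (String × String)) (d : PySem.Dict String String)
    (k : String) (h : (l.map Prod.fst).Nodup) :
    (l.foldl (fun d p => d.insert p.1 p.2) d).get? k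
      = ((PySem.Dict.ofList l).get? k).or (d.get? k) := by
  induction l generalizing d with
  | nil => rfl
  | cons p t ih =>
    obtain ⟨k0, v0⟩ := p
    simp only [List.map_cons, List.nodup_cons] at h
    obtain ⟨hk0, ht⟩ := h
    have hofl : (PySem.Dict.ofList ((k0, v0) :: t)).get? k
        = ((PySem.Dict.ofList t).get? k).or ((PySem.Dict.empty.insert k0 v0).get? k) := by
      show ((t.foldl (fun d p => d.insert p.1 p.2) (PySem.Dict.empty.insert k0 v0))).get? k = _
      exact ih (PySem.Dict.empty.insert k0 v0) ht
    show ((t.foldl (fun d p => d.insert p.1 p.2) (d.insert k0 v0))).get? k = _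
    rw [ih (d.insert k0 v0) ht, hofl]
    by_cases hk : k = k0
    · subst hk
      have hnone : (PySem.Dict.ofList t).get? k = none := by
        rw [PySem.Dict.get?_eq_none_iff_not_mem_keys, keys_ofList_nodup t ht]
        exact hk0
      simp [hnone, PySem.Dict.get?_insert_self]
    · rw [PySem.Dict.get?_insert_of_ne _ _ hk, PySem.Dict.get?_insert_of_ne _ _ hk,
        PySem.Dict.get?_empty]
      cases (PySem.Dict.ofList t).get? k <;> simp

-- the two merge orders have the same number of keys
lemma size_update_comm (a b : List (String × String))
    (ha : (a.map Prod.fst).Nodup) (hb : (b.map Prod.fst).Nodup) :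
    ((PySem.Dict.ofList a).update b).size = ((PySem.Dict.ofList b).update a).size := by
  have hsz : ∀ (d : PySem.Dict String String), d.size = d.keys.length := by
    intro d; show d.items.length = (d.items.map Prod.fst).length; simp
  have hkeys : ∀ (x y : List (String × String)), (hx : (x.map Prod.fst).Nodup) →
      ((PySem.Dict.ofList x).update y).keys
        = PySem.Set.update (x.map Prod.fst) (y.map Prod.fst) := by
    intro x y hx
    have := PySem.Dict.keys_foldl_insert_key y Prod.fst (fun _ p => p.2)
      (PySem.Dict.ofList x)
    rw [keys_ofList_nodup x hx] at this
    exact this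
  rw [hsz, hsz, hkeys a b ha, hkeys b a hb]
  have h1 := PySem.Set.nodup_update (a.map Prod.fst) (b.map Prod.fst) (by simpa using ha)
  have h2 := PySem.Set.nodup_update (b.map Prod.fst) (a.map Prod.fst) (by simpa using hb)
  exact ((List.perm_ext_iff_of_nodup h1 h2).mpr (by
    intro k
    rw [PySem.Set.mem_update, PySem.Set.mem_update]
    tauto)).length_eq

lemma nodup_keys_update (x y : List (String × String)) (hx : (x.map Prod.fst).Nodup) :
    ((PySem.Dict.ofList x).update y).keys.Nodup :=
  PySem.Dict.nodup_keys_foldl_insert_key y Prod.fst (fun _ p => p.2)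
    (PySem.Dict.ofList x) (by rw [keys_ofList_nodup x hx]; exact hx)

-- B's symmetric-merge equality test equals the negation of A's conflict condition
lemma pyDictEq_eq_not_conflict (a b : List (String × String))
    (ha : (a.map Prod.fst).Nodup) (hb : (b.map Prod.fst).Nodup) :
    pyDictEq ((PySem.Dict.ofList a).update b) ((PySem.Dict.ofList b).update a)
      = !(b.any (fun p => (PySem.Dict.ofList a).contains p.1
            && ((PySem.Dict.ofList a).get? p.1 != some p.2))) := by
  have hsz := size_update_comm a b ha hb
  have hget1 : ∀ k, ((PySem.Dict.ofList a).update b).get? k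
      = ((PySem.Dict.ofList b).get? k).or ((PySem.Dict.ofList a).get? k) :=
    fun k => get?_update_nodup b (PySem.Dict.ofList a) k hb
  have hget2 : ∀ k, ((PySem.Dict.ofList b).update a).get? k
      = ((PySem.Dict.ofList a).get? k).or ((PySem.Dict.ofList b).get? k) :=
    fun k => get?_update_nodup a (PySem.Dict.ofList b) k ha
  unfold pyDictEq
  rw [hsz]
  simp only [BEq.rfl, Bool.true_and]
  apply Bool.eq_iff_iff.mpr
  rw [List.all_eq_true, Bool.not_eq_eq_eq_not, Bool.not_true, List.any_eq_false]
  constructor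
  · -- every merged item agrees with the other merge order → no conflict
    intro hall p hp
    obtain ⟨k, v⟩ := p
    by_cases hca : (PySem.Dict.ofList a).contains k = true
    · obtain ⟨u, hu⟩ : ∃ u, (PySem.Dict.ofList a).get? k = some u := by
        rcases hg : (PySem.Dict.ofList a).get? k with _ | u
        · rw [(PySem.Dict.get?_eq_none_iff_contains _ k).mp hg] at hca; cases hca
        · exact ⟨u, rfl⟩
      have hvb : (PySem.Dict.ofList b).get? k = some v :=
        (PySem.Dict.get?_eq_some_iff_mem_items _ k v (by
          rw [keys_ofList_nodup b hb]; exact hb)).mpr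
          (by rw [items_ofList_nodup b hb]; exact hp)
      have hm1 : ((PySem.Dict.ofList a).update b).get? k = some v := by
        rw [hget1, hvb]; rfl
      have := hall (k, v) ((PySem.Dict.get?_eq_some_iff_mem_items _ k v
        (nodup_keys_update a b ha)).mp hm1)
      rw [hget2 k, hu] at this
      simp only [Option.some_or, beq_iff_eq, Option.some.injEq] at this
      simp [hca, hu, this]
    · simp only [Bool.not_eq_true] at hca
      simp [hca]
  · -- no conflict → every merged item agrees with the other merge order
    intro hnc p hp
    obtain ⟨k, v⟩ := p
    have hm1 : ((PySem.Dict.ofList a).update b).get? k = some v :=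
      (PySem.Dict.get?_eq_some_iff_mem_items _ k v (nodup_keys_update a b ha)).mpr hp
    rw [hget1 k] at hm1
    rw [hget2 k]
    rcases hgb : (PySem.Dict.ofList b).get? k with _ | w
    · -- k not in b: both merges return a's value
      rw [hgb] at hm1
      simp only [Option.none_or] at hm1
      rw [hm1]
      simp
    · -- k in b with value w = v
      rw [hgb] at hm1
      simp only [Option.some_or, Option.some.injEq] at hm1
      subst hm1
      have hmemb : (k, w) ∈ b := by
        rw [← items_ofList_nodup b hb]
        exact PySem.Dict.mem_items_of_get?_eq_some (PySem.Dict.ofList b) hgb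
      rcases hga : (PySem.Dict.ofList a).get? k with _ | u
      · simp
      · have hca : (PySem.Dict.ofList a).contains k = true := by
          rcases hc : (PySem.Dict.ofList a).contains k
          · rw [(PySem.Dict.get?_eq_none_iff_contains _ k).mpr hc] at hga; cases hga
          · rfl
        have huw := hnc (k, w) hmemb
        simp only [hca, hga, Bool.true_and, Bool.not_eq_true, bne_eq_false_iff_eq,
          Option.some.injEq] at huw
        subst huw; simp

-- inserting a key absent from t does not change the conflict test over t
lemma any_conflict_insert (t : List (String × String)) (nv : PySem.Dict String String)
    (k v : String) (hk : k ∉ t.map Prod.fst) :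
    (t.any (fun p => (nv.insert k v).contains p.1 && ((nv.insert k v).get? p.1 != some p.2)))
      = t.any (fun p => nv.contains p.1 && (nv.get? p.1 != some p.2)) := by
  induction t with
  | nil => rfl
  | cons p t ih =>
    have hne : p.1 ≠ k := by
      intro h; exact hk (by simp [h])
    have hk' : k ∉ t.map Prod.fst := by
      intro h; exact hk (by simp [h])
    have h1 : (p.1 == k) = false := by simp [hne]
    rw [List.any_cons, List.any_cons, ih hk', PySem.Dict.contains_insert,
      PySem.Dict.get?_insert_of_ne nv v hne, h1, Bool.false_or]

-- characterisation of A's loop: early-return conflict test, then the accumulated merge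
lemma tmvLoopA_eq (b : List (String × String)) (nv : PySem.Dict String String)
    (hb : (b.map Prod.fst).Nodup) :
    tmvLoopA nv b =
      if b.any (fun p => nv.contains p.1 && (nv.get? p.1 != some p.2)) then (false, [])
      else (true, (b.foldl (fun d p => d.insert p.1 p.2) nv).items) := by
  induction b generalizing nv with
  | nil => simp [tmvLoopA]
  | cons p t ih =>
    obtain ⟨k, v⟩ := p
    have hk : k ∉ t.map Prod.fst := by
      simp only [List.map_cons, List.nodup_cons] at hb; exact hb.1
    have ht : (t.map Prod.fst).Nodup := by
      simp only [List.map_cons, List.nodup_cons] at hb; exact hb.2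
    by_cases h : (nv.contains k && (nv.get? k != some v)) = true
    · simp [tmvLoopA, h]
    · have h' : (nv.contains k && (nv.get? k != some v)) = false := by
        simpa using h
      simp only [tmvLoopA, h', ih (nv.insert k v) ht, List.any_cons,
        any_conflict_insert t nv k v hk, Bool.false_or, List.foldl_cons]
      simp

-- ===== VERDICT (by name: the statement is the Claim_ definition above) =====
theorem try_merge_variables_spec : Claim_equal_try_merge_variables := by
  intro a b _ hpre
  obtain ⟨ha, hb⟩ := hpre
  unfold Spec_try_merge_variables try_merge_variables try_merge_variables_alt
  dsimp only
  rw [tmvLoopA_eq b _ hb, pyDictEq_eq_not_conflict a b ha hb]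
  by_cases hc : (b.any (fun p => (PySem.Dict.ofList a).contains p.1
      && ((PySem.Dict.ofList a).get? p.1 != some p.2))) = true
  · simp [hc]
  · simp only [Bool.not_eq_true] at hc
    simp [hc]
    rfl
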